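-- pv_equiv track=rewrite | github.com/kit-cel/gr-lte | python/lte_test/encode_bch.py | convolutional_encoder
-- ===== SOURCE A (Python) =====
-- def convolutional_encoder(input_data):
--     data = input_data[len(input_data) - 6:]
--     data.extend(input_data)
--
--     reg = [0] * 6
--     c_encoded = [0] * 3 * len(data)
--     for i in range(len(data)):
--         c_encoded[i * 3 + 0] = (data[i] + reg[1] + reg[2] + reg[4] + reg[5] ) % 2
--         c_encoded[i * 3 + 1] = (data[i] + reg[0] + reg[1] + reg[2] + reg[5] ) % 2
--         c_encoded[i * 3 + 2] = (data[i] + reg[0] + reg[1] + reg[3] + reg[5] ) % 2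
--
--         reg[1:6] = reg[0:5]
--         reg[0] = data[i]
--
--     return c_encoded[18:]
-- ===== SOURCE B (Python) =====
-- def convolutional_encoder(input_data):
--     # Same data construction as the reference (cyclic prefix of the last 6 bits).
--     data = input_data[len(input_data) - 6:] + input_data
--     # No shift register: reg[j] at step i equals data[i-1-j]; since output starts
--     # at i = 6 every back-index is in range, so each output bit is a direct parity.
--     return [bit
--             for i in range(6, len(data))
--             for bit in ((data[i] + data[i-2] + data[i-3] + data[i-5] + data[i-6]) % 2,
--                         (data[i] + data[i-1] + data[i-2] + data[i-3] + data[i-6]) % 2,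
--                         (data[i] + data[i-1] + data[i-2] + data[i-4] + data[i-6]) % 2)]
-- ===== Notes on version B (the rewrite author's own statement) =====
-- stated objective: alternative
-- what changed: Replaces the stateful 6-bit shift register and the preallocated list mutated by index with a direct stateless computation: each of the three output bits of position i is a parity of data[i] and fixed back-indices data[i-1..i-6] (valid because output only starts at i=6), emitted by a flat comprehension; the first 18 bits are never produced instead of being sliced off.
import Mathlib
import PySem

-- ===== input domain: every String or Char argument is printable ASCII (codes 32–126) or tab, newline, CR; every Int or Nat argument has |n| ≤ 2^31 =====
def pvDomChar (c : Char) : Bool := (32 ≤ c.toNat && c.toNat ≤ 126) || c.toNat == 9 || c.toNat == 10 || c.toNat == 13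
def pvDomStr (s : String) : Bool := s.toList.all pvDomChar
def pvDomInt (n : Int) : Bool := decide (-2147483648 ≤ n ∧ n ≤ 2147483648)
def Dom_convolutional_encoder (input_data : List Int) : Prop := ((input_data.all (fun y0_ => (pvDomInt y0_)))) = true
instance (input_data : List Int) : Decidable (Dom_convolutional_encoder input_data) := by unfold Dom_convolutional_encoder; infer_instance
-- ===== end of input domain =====

-- B replaces A's mutated shift register and index-written preallocated list by a direct,
-- stateless parity computation per output position (alternative decomposition, same cost).

-- ===== PORT A =====
-- Loop body of A: writes the three output bits at i*3, i*3+1, i*3+2, then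
-- 'reg[1:6] = reg[0:5]; reg[0] = data[i]', i.e. reg becomes data[i] :: reg[0:5].
def pvAStep (data : List Int) (st : List Int × List Int) (i : Nat) : List Int × List Int :=
  (((st.1.set (i * 3)
        (PySem.Int.mod (data.getD i 0 + st.2.getD 1 0 + st.2.getD 2 0 + st.2.getD 4 0 + st.2.getD 5 0) 2)).set (i * 3 + 1)
        (PySem.Int.mod (data.getD i 0 + st.2.getD 0 0 + st.2.getD 1 0 + st.2.getD 2 0 + st.2.getD 5 0) 2)).set (i * 3 + 2)
        (PySem.Int.mod (data.getD i 0 + st.2.getD 0 0 + st.2.getD 1 0 + st.2.getD 3 0 + st.2.getD 5 0) 2),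
   data.getD i 0 :: st.2.take 5)

def convolutional_encoder (input_data : List Int) : List Int :=
  -- data = input_data[len(input_data) - 6:]; data.extend(input_data)
  let data := PySem.List.slice input_data (some ((input_data.length : Int) - 6)) none ++ input_data
  let reg : List Int := List.replicate 6 0
  let c_encoded : List Int := List.replicate (3 * data.length) 0
  let res := (List.range data.length).foldl (pvAStep data) (c_encoded, reg)
  res.1.drop 18   -- c_encoded[18:]

-- ===== PORT B =====
-- The three parity bits B emits for position i (all back-indices in range since i ≥ 6).
def pvBTriple (data : List Int) (i : Nat) : List Int :=
  [PySem.Int.mod (data.getD i 0 + data.getD (i-2) 0 + data.getD (i-3) 0 + data.getD (i-5) 0 + data.getD (i-6) 0) 2,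
   PySem.Int.mod (data.getD i 0 + data.getD (i-1) 0 + data.getD (i-2) 0 + data.getD (i-3) 0 + data.getD (i-6) 0) 2,
   PySem.Int.mod (data.getD i 0 + data.getD (i-1) 0 + data.getD (i-2) 0 + data.getD (i-4) 0 + data.getD (i-6) 0) 2]

def convolutional_encoder_alt (input_data : List Int) : List Int :=
  let data := PySem.List.slice input_data (some ((input_data.length : Int) - 6)) none ++ input_data
  (List.range' 6 (data.length - 6)).flatMap (pvBTriple data)

-- ===== PRECONDITION & SPEC =====
def Spec_convolutional_encoder (input_data : List Int) (out : List Int) : Prop := out = convolutional_encoder_alt input_data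
instance (input_data : List Int) (out : List Int) : Decidable (Spec_convolutional_encoder input_data out) := by unfold Spec_convolutional_encoder; infer_instance

-- ===== CLAIM (what is proved, stated in full; the proofs are below) =====
def Claim_equal_convolutional_encoder : Prop := ∀ (input_data : List Int), Dom_convolutional_encoder input_data → Spec_convolutional_encoder input_data (convolutional_encoder input_data)

-- ===== LEMMAS AND PROOFS =====

-- reg[j] after i loop iterations: data[i-1-j] with zero-initialisation, i.e. pvE data i (j+1).
def pvE (data : List Int) (i j : Nat) : Int := if j ≤ i then data.getD (i - j) 0 else 0

def pvRegAt (data : List Int) (i : Nat) : List Int :=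
  [pvE data i 1, pvE data i 2, pvE data i 3, pvE data i 4, pvE data i 5, pvE data i 6]

-- the triple A writes at step i, expressed through pvE
def pvATriple (data : List Int) (i : Nat) : List Int :=
  [PySem.Int.mod (data.getD i 0 + pvE data i 2 + pvE data i 3 + pvE data i 5 + pvE data i 6) 2,
   PySem.Int.mod (data.getD i 0 + pvE data i 1 + pvE data i 2 + pvE data i 3 + pvE data i 6) 2,
   PySem.Int.mod (data.getD i 0 + pvE data i 1 + pvE data i 2 + pvE data i 4 + pvE data i 6) 2]

theorem pvE_succ (data : List Int) (i j : Nat) : pvE data (i+1) (j+1) = pvE data i j := by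
  simp [pvE, Nat.succ_sub_succ]

theorem pvE_zero (data : List Int) (i : Nat) : pvE data i 0 = data.getD i 0 := by
  simp [pvE]

theorem pvRegAt_zero (data : List Int) : pvRegAt data 0 = List.replicate 6 0 := by
  simp [pvRegAt, pvE]

theorem pvRegAt_succ (data : List Int) (i : Nat) :
    pvRegAt data (i+1) = data.getD i 0 :: (pvRegAt data i).take 5 := by
  show [pvE data (i+1) (0+1), pvE data (i+1) (1+1), pvE data (i+1) (2+1), pvE data (i+1) (3+1),
        pvE data (i+1) (4+1), pvE data (i+1) (5+1)] = _
  simp [pvRegAt, pvE_succ, pvE_zero]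

theorem length_flatMap_pvATriple (data : List Int) (l : List Nat) :
    (l.flatMap (pvATriple data)).length = 3 * l.length := by
  induction l with
  | nil => simp
  | cons x xs ih => simp [pvATriple] at *; omega

-- one step of A's loop, on the characterised state
theorem pvAStep_char (data : List Int) (n : Nat) (hn : n < data.length) :
    pvAStep data ((List.range n).flatMap (pvATriple data) ++ List.replicate (3 * (data.length - n)) 0,
                  pvRegAt data n) n
    = ((List.range (n+1)).flatMap (pvATriple data) ++ List.replicate (3 * (data.length - (n+1))) 0,
       pvRegAt data (n+1)) := by
  have hrep : List.replicate (3 * (data.length - n)) (0 : Int)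
      = 0 :: 0 :: 0 :: List.replicate (3 * (data.length - (n+1))) 0 := by
    have h3 : 3 * (data.length - n) = 3 + 3 * (data.length - (n+1)) := by omega
    rw [h3, List.replicate_add]
    rfl
  have hlen : ((List.range n).flatMap (pvATriple data)).length = 3 * n :=
    by simpa using length_flatMap_pvATriple data (List.range n)
  unfold pvAStep
  simp only [Prod.mk.injEq]
  refine ⟨?_, (pvRegAt_succ data n).symm⟩
  simp only [List.set_append, hlen, hrep, List.range_succ, List.flatMap_append]
  have c1 : ¬ (n * 3 < 3 * n) := by omega
  have c2 : ¬ (n * 3 + 1 < 3 * n) := by omega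
  have c3 : ¬ (n * 3 + 2 < 3 * n) := by omega
  have e1 : n * 3 - 3 * n = 0 := by omega
  have e2 : n * 3 + 1 - 3 * n = 1 := by omega
  have e3 : n * 3 + 2 - 3 * n = 2 := by omega
  simp [c1, e1, pvATriple, pvRegAt]

theorem pvFold_char (data : List Int) (n : Nat) (hn : n ≤ data.length) :
    (List.range n).foldl (pvAStep data) (List.replicate (3 * data.length) 0, List.replicate 6 0)
    = ((List.range n).flatMap (pvATriple data) ++ List.replicate (3 * (data.length - n)) 0,
       pvRegAt data n) := by
  induction n with
  | zero => simp [pvRegAt_zero]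
  | succ m ih =>
    have hm : m ≤ data.length := by omega
    rw [List.range_succ, List.foldl_append, ih hm]
    simp only [List.foldl_cons, List.foldl_nil]
    rw [pvAStep_char data m (by omega), List.range_succ]

theorem pvATriple_eq_pvBTriple (data : List Int) (i : Nat) (hi : 6 ≤ i) :
    pvATriple data i = pvBTriple data i := by
  have e : ∀ j : Nat, j ≤ 6 → pvE data i j = data.getD (i - j) 0 := by
    intro j hj; simp [pvE, Nat.le_trans hj hi]
  simp [pvATriple, pvBTriple, e 1 (by omega), e 2 (by omega), e 3 (by omega),
        e 4 (by omega), e 5 (by omega), e 6 (by omega)]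

-- drop 18 of the full flattened triple list = B's flatMap from position 6
theorem pvDrop_eq (data : List Int) :
    ((List.range data.length).flatMap (pvATriple data)).drop 18
    = (List.range' 6 (data.length - 6)).flatMap (pvBTriple data) := by
  by_cases h : data.length ≤ 6
  · have hL := length_flatMap_pvATriple data (List.range data.length)
    rw [List.length_range] at hL
    rw [List.drop_eq_nil_of_le (by omega), show data.length - 6 = 0 by omega]
    rfl
  · have hsplit : List.range data.length = List.range' 0 6 ++ List.range' 6 (data.length - 6) := by
      rw [List.range_eq_range']
      have : List.range' 0 6 ++ List.range' (0 + 1 * 6) (data.length - 6) 1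
          = List.range' 0 (6 + (data.length - 6)) := List.range'_append
      simp at this
      rw [this]
      congr 1
      omega
    rw [hsplit, List.flatMap_append]
    have hlen6 : ((List.range' 0 6).flatMap (pvATriple data)).length = 18 := by
      rw [length_flatMap_pvATriple]
      simp
    rw [show (18 : Nat) = ((List.range' 0 6).flatMap (pvATriple data)).length from hlen6.symm,
        List.drop_left]
    refine List.flatMap_congr ?_
    intro i hi
    have : 6 ≤ i := (List.mem_range'_1.mp hi).1
    exact pvATriple_eq_pvBTriple data i this

-- ===== VERDICT (by name: the statement is the Claim_ definition above) =====
theorem convolutional_encoder_spec : Claim_equal_convolutional_encoder := by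
  intro input_data _
  unfold Spec_convolutional_encoder convolutional_encoder convolutional_encoder_alt
  set data := PySem.List.slice input_data (some ((input_data.length : Int) - 6)) none ++ input_data with hdata
  simp only [pvFold_char data data.length (le_refl _)]
  simp [pvDrop_eq data]
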